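-- pv_equiv track=rewrite | github.com/FatmaElMahdi1000/AASTM | Practice/Coding_in_python/interviewPrep.TestGorillaCoding/CountOfInt.py | IntCount
-- ===== SOURCE A (Python) =====
-- def IntCount(arr, val,n):
--     smaller = 0
--     larger = 0
--     EqualTo = 0
--     #0 1 2 3
--     array = arr.split(" ")
--     array = [int(n) for n in array]
--     for i in range(0, n):
--         if array[i] < val: #
--             smaller+=1
--         elif array[i] == val:
--             EqualTo+=1
--         else:
--             larger+=1
--     return f"{smaller}{EqualTo}{larger}"
-- ===== SOURCE B (Python) =====
-- def IntCount(arr, val, n):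
--     array = [int(x) for x in arr.split(" ")]
--     sub = array[:n] if n > 0 else []
--     smaller = sum(1 for x in sub if x < val)
--     EqualTo = sub.count(val)
--     return f"{smaller}{EqualTo}{len(sub) - smaller - EqualTo}"
-- ===== Notes on version B (the rewrite author's own statement) =====
-- stated objective: simpler
-- what changed: Replaces A's three-counter index loop over range(0, n) by slicing the prefix array[:n] and counting smaller/equal directly (sum over a comparison and list.count), deriving the larger count arithmetically as len - smaller - equal.
import Mathlib
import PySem

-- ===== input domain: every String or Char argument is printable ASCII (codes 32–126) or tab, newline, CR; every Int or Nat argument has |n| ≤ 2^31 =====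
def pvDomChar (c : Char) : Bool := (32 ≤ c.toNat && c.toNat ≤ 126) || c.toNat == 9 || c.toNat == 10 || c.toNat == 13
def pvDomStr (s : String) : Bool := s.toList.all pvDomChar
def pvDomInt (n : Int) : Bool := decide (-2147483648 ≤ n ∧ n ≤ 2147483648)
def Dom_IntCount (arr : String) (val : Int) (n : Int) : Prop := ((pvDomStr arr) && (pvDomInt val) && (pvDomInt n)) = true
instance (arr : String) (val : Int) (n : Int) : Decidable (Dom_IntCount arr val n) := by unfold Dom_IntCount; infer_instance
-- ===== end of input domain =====

-- B replaces A's three-counter index loop by slicing the prefix and counting smaller/equal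
-- directly (larger by arithmetic): simpler, same cost. Equivalence is on return values.

-- ===== PORT A =====
-- arr.split(" ") — the separator is nonempty, so split? is always some; .getD [] is total
def pvTokens (arr : String) : List String := (PySem.Str.split? arr " ").getD []
-- [int(t) for t in …] — .getD 0 is total; Pre_ guarantees every token parses (int() raises otherwise)
def pvParse (arr : String) : List Int := (pvTokens arr).map (fun t => (PySem.Int.ofStr? t).getD 0)

def IntCount (arr : String) (val : Int) (n : Int) : String :=
  let array := pvParse arr
  let res := (PySem.List.pyRange 0 n 1).foldl
    (fun (acc : Int × Int × Int) i =>
      let x := PySem.List.pyGetD array i 0   -- array[i]; total under Pre_ (0 ≤ i < n ≤ length)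
      if x < val then (acc.1 + 1, acc.2.1, acc.2.2)
      else if x = val then (acc.1, acc.2.1 + 1, acc.2.2)
      else (acc.1, acc.2.1, acc.2.2 + 1))
    ((0 : Int), (0 : Int), (0 : Int))
  PySem.Int.toStr res.1 ++ PySem.Int.toStr res.2.1 ++ PySem.Int.toStr res.2.2

-- ===== PORT B =====
def IntCount_alt (arr : String) (val : Int) (n : Int) : String :=
  let array := pvParse arr
  let sub := if 0 < n then PySem.List.slice array none (some n) else []  -- array[:n] if n > 0 else []
  let smaller : Int := (sub.countP (fun x => x < val) : Nat)             -- sum(1 for x in sub if x < val)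
  let equalTo : Int := (PySem.List.count sub val : Nat)                  -- sub.count(val)
  PySem.Int.toStr smaller ++ PySem.Int.toStr equalTo ++
    PySem.Int.toStr ((sub.length : Int) - smaller - equalTo)

-- ===== PRECONDITION & SPEC =====
-- Pre_ excludes exactly where A raises: a token int() rejects (ValueError), or n > len(array) (IndexError).
def Pre_IntCount (arr : String) (val : Int) (n : Int) : Prop :=
  (∀ t ∈ pvTokens arr, (PySem.Int.ofStr? t).isSome) ∧ n ≤ ((pvTokens arr).length : Int)
instance (arr : String) (val : Int) (n : Int) : Decidable (Pre_IntCount arr val n) := by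
  unfold Pre_IntCount; infer_instance

def pvWitness_IntCount : String × Int × Int := ("3 1 2 2", 2, 3)

def Spec_IntCount (arr : String) (val : Int) (n : Int) (out : String) : Prop := out = IntCount_alt arr val n
instance (arr : String) (val : Int) (n : Int) (out : String) : Decidable (Spec_IntCount arr val n out) := by unfold Spec_IntCount; infer_instance

-- ===== CLAIM (what is proved, stated in full; the proofs are below) =====
def Claim_equal_IntCount : Prop := ∀ (arr : String) (val : Int) (n : Int), Dom_IntCount arr val n → Pre_IntCount arr val n → Spec_IntCount arr val n (IntCount arr val n)

-- ===== LEMMAS AND PROOFS =====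

-- A's three-counter fold over any list, with a general accumulator
theorem pvFold_counts (val : Int) (l : List Int) (a b c : Int) :
    l.foldl
      (fun (acc : Int × Int × Int) x =>
        if x < val then (acc.1 + 1, acc.2.1, acc.2.2)
        else if x = val then (acc.1, acc.2.1 + 1, acc.2.2)
        else (acc.1, acc.2.1, acc.2.2 + 1)) (a, b, c)
    = (a + (l.countP (fun x => x < val) : Nat),
       b + (l.count val : Nat),
       c + (l.countP (fun x => val < x) : Nat)) := by
  induction l generalizing a b c with
  | nil => simp
  | cons x xs ih =>
    simp only [List.foldl_cons, List.countP_cons, List.count_cons]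
    by_cases h1 : x < val
    · rw [if_pos h1, ih]
      have hne : (x == val) = false := by simp; omega
      have h2 : ¬ val < x := by omega
      simp [Prod.ext_iff, h1, hne, h2]
      omega
    · by_cases h2 : x = val
      · rw [if_neg h1, if_pos h2, ih]
        simp [Prod.ext_iff, h2]
        omega
      · have h3 : val < x := by omega
        have hne : (x == val) = false := by simp [h2]
        rw [if_neg h1, if_neg h2, ih]
        simp [Prod.ext_iff, h1, hne, h3]
        omega

theorem pvCounts_length (val : Int) (l : List Int) :
    l.countP (fun x => x < val) + l.count val + l.countP (fun x => val < x) = l.length := by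
  induction l with
  | nil => simp
  | cons x xs ih =>
    simp only [List.countP_cons, List.count_cons, List.length_cons]
    by_cases h1 : x < val
    · have hne : (x == val) = false := by simp; omega
      have h2 : ¬ val < x := by omega
      simp [h1, hne, h2]; omega
    · by_cases h2 : x = val
      · have heq : (x == val) = true := by simp [h2]
        simp [h2]; omega
      · have h3 : val < x := by omega
        have hne : (x == val) = false := by simp [h2]
        simp [h1, hne, h3]; omega

-- the index loop over range(0, n) reads exactly the prefix array.take n.toNat when n ≤ length
theorem pvLoop_eq_take (array : List Int) (val n : Int) (hn : 0 < n)
    (hlen : n ≤ (array.length : Int)) :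
    (PySem.List.pyRange 0 n 1).foldl
      (fun (acc : Int × Int × Int) i =>
        let x := PySem.List.pyGetD array i 0
        if x < val then (acc.1 + 1, acc.2.1, acc.2.2)
        else if x = val then (acc.1, acc.2.1 + 1, acc.2.2)
        else (acc.1, acc.2.1, acc.2.2 + 1)) ((0 : Int), (0 : Int), (0 : Int))
    = (array.take n.toNat).foldl
      (fun (acc : Int × Int × Int) x =>
        if x < val then (acc.1 + 1, acc.2.1, acc.2.2)
        else if x = val then (acc.1, acc.2.1 + 1, acc.2.2)
        else (acc.1, acc.2.1, acc.2.2 + 1)) ((0 : Int), (0 : Int), (0 : Int)) := by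
  have hlen' : ((array.take n.toNat).length : Int) = n := by
    simp [List.length_take]; omega
  have hstep : (PySem.List.pyRange 0 n 1).foldl
      (fun (acc : Int × Int × Int) i =>
        let x := PySem.List.pyGetD array i 0
        if x < val then (acc.1 + 1, acc.2.1, acc.2.2)
        else if x = val then (acc.1, acc.2.1 + 1, acc.2.2)
        else (acc.1, acc.2.1, acc.2.2 + 1)) ((0 : Int), (0 : Int), (0 : Int))
    = (PySem.List.pyRange 0 n 1).foldl
      (fun (acc : Int × Int × Int) i =>
        let x := PySem.List.pyGetD (array.take n.toNat) i 0
        if x < val then (acc.1 + 1, acc.2.1, acc.2.2)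
        else if x = val then (acc.1, acc.2.1 + 1, acc.2.2)
        else (acc.1, acc.2.1, acc.2.2 + 1)) ((0 : Int), (0 : Int), (0 : Int)) := by
    apply PySem.List.foldl_congr_mem
    intro acc i hi
    rw [PySem.List.mem_pyRange_one] at hi
    simp only [PySem.List.pyGetD_eq_getElem array 0 hi.1 (by omega),
      PySem.List.pyGetD_eq_getElem (array.take n.toNat) 0 hi.1 (by omega),
      List.getElem_take]
  rw [hstep]
  generalize hl : array.take n.toNat = l at hlen' ⊢
  rw [← hlen']
  exact PySem.List.foldl_pyRange_zero_pyGetD' l 0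
    (fun acc x =>
      if x < val then (acc.1 + 1, acc.2.1, acc.2.2)
      else if x = val then (acc.1, acc.2.1 + 1, acc.2.2)
      else (acc.1, acc.2.1, acc.2.2 + 1)) ((0 : Int), (0 : Int), (0 : Int))

-- ===== VERDICT (by name: the statement is the Claim_ definition above) =====
theorem IntCount_spec : Claim_equal_IntCount := by
  intro arr val n _ hpre
  unfold Spec_IntCount IntCount IntCount_alt
  dsimp only
  obtain ⟨hparse, hlen⟩ := hpre
  have hL : (pvParse arr).length = (pvTokens arr).length := by simp [pvParse]
  by_cases hn : 0 < n
  · rw [pvLoop_eq_take (pvParse arr) val n hn (by rw [hL]; exact hlen)]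
    rw [pvFold_counts]
    have hsl : PySem.List.slice (pvParse arr) none (some n) = (pvParse arr).take n.toNat :=
      PySem.List.slice_to _ (le_of_lt hn)
    have hcl := pvCounts_length val ((pvParse arr).take n.toNat)
    simp only [if_pos hn, hsl, PySem.List.count_eq, zero_add]
    congr 1
    congr 1
    omega
  · rw [PySem.List.pyRange_one_eq_nil (by omega)]
    simp [hn]
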